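-- pv_equiv track=rewrite | github.com/OnlineFenix/newvip | django_project/views.py | chartMaker
-- ===== SOURCE A (Python) =====
-- def chartMaker(list):
--     new_list = ['RECORD CHART', 'OCTOBER 2024', '\n', "________________________", 'DB SG FB FZ GB LB GL DS']
--     tempList = []
--     for item in list:
--         if len(tempList) <= 7:
--             tempList.append(item)
--         else:
--             string = '-'.join(tempList)
--             new_list.append(string)
--             tempList = []
--             tempList.append(item)
--
--     string = '-'.join(tempList)
--     new_list.append(string)
--     new_list.append("________________________")
--     new_list.append("https://vip-satta-result.in/")
--     new_list.append("https://vip-satta-result.in/")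
--     return new_list
-- ===== SOURCE B (Python) =====
-- HEADER = ['RECORD CHART', 'OCTOBER 2024', '\n', "________________________", 'DB SG FB FZ GB LB GL DS']
-- FOOTER = ["________________________", "https://vip-satta-result.in/", "https://vip-satta-result.in/"]
--
-- def chartMaker(list):
--     chunks = []
--     i = 0
--     while True:
--         chunks.append('-'.join(list[i:i+8]))
--         i += 8
--         if i >= len(list):
--             break
--     return HEADER + chunks + FOOTER
-- ===== Notes on version B (the rewrite author's own statement) =====
-- stated objective: simpler
-- what changed: Replaces the buffer-accumulator loop with a per-item length branch by an index loop that joins the 8-element slices list[i:i+8] directly; no tempList buffer is maintained.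
import Mathlib
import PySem

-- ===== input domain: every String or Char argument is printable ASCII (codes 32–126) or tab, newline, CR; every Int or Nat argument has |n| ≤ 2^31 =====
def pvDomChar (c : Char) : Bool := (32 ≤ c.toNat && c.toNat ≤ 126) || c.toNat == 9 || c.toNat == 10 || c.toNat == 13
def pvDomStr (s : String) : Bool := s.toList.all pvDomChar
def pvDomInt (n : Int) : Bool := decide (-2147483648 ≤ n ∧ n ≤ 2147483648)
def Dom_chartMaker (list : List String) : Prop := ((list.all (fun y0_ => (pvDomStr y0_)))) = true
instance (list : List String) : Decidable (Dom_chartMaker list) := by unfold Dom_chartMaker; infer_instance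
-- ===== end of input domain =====

-- B replaces A's buffer-accumulator loop (per-item length branch) by an index loop that joins 8-element slices directly (objective: simpler).

-- ===== PORT A =====
-- the for-loop of A, carrying (new_list, tempList)
def chartMakerLoop : List String → List String → List String → List String × List String
  | [], newList, temp => (newList, temp)
  | item :: rest, newList, temp =>
    if temp.length ≤ 7 then
      chartMakerLoop rest newList (temp ++ [item])
    else
      chartMakerLoop rest (newList ++ [PySem.Str.join "-" temp]) ([] ++ [item])

def chartMaker (list : List String) : List String :=
  let newList := ["RECORD CHART", "OCTOBER 2024", "\n", "________________________", "DB SG FB FZ GB LB GL DS"]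
  let p := chartMakerLoop list newList []
  (((p.1 ++ [PySem.Str.join "-" p.2]) ++ ["________________________"]) ++ ["https://vip-satta-result.in/"]) ++ ["https://vip-satta-result.in/"]

-- ===== PORT B =====
def pvHeader : List String := ["RECORD CHART", "OCTOBER 2024", "\n", "________________________", "DB SG FB FZ GB LB GL DS"]
def pvFooter : List String := ["________________________", "https://vip-satta-result.in/", "https://vip-satta-result.in/"]

-- Source B's while-True loop; i is the running index (only ever 0,8,16,…, so a Nat carries it;
-- its comparisons with len(list) are the same over Nat as over Python's ints)
def altLoop (xs : List String) (chunks : List String) (i : Nat) : List String :=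
  let chunks' := chunks ++ [PySem.Str.join "-" (PySem.List.slice xs (some (i : Int)) (some ((i : Int) + 8)))]
  let i' := i + 8
  if xs.length ≤ i' then chunks' else altLoop xs chunks' i'
termination_by xs.length - i

def chartMaker_alt (list : List String) : List String :=
  pvHeader ++ altLoop list [] 0 ++ pvFooter

-- ===== PRECONDITION & SPEC =====
def Spec_chartMaker (list : List String) (out : List String) : Prop := out = chartMaker_alt list
instance (list : List String) (out : List String) : Decidable (Spec_chartMaker list out) := by unfold Spec_chartMaker; infer_instance

-- ===== CLAIM (what is proved, stated in full; the proofs are below) =====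
def Claim_equal_chartMaker : Prop := ∀ (list : List String), Dom_chartMaker list → Spec_chartMaker list (chartMaker list)

-- ===== LEMMAS AND PROOFS =====
-- specification middleman: the '-'-joined 8-chunks of xs (one '' chunk for empty xs)
def chunkJoins (xs : List String) : List String :=
  if xs.length ≤ 8 then [PySem.Str.join "-" xs]
  else PySem.Str.join "-" (xs.take 8) :: chunkJoins (xs.drop 8)
termination_by xs.length
decreasing_by simp; omega

lemma chunkJoins_small (t : List String) (h : t.length ≤ 8) :
    chunkJoins t = [PySem.Str.join "-" t] := by
  rw [chunkJoins.eq_def, if_pos h]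

lemma chunkJoins_flush (t : List String) (ht : t.length = 8) (x : String) (rest : List String) :
    chunkJoins (t ++ x :: rest) = PySem.Str.join "-" t :: chunkJoins (x :: rest) := by
  rw [chunkJoins.eq_def, if_neg (by simp [ht])]
  rw [List.take_left' ht, List.drop_left' ht]

-- A's loop computes exactly the chunk joins of temp ++ xs appended to new_list
lemma loop_spec (xs : List String) : ∀ (nl t : List String), t.length ≤ 8 →
    (chartMakerLoop xs nl t).1 ++ [PySem.Str.join "-" (chartMakerLoop xs nl t).2]
      = nl ++ chunkJoins (t ++ xs) := by
  induction xs with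
  | nil =>
    intro nl t ht
    simp [chartMakerLoop, chunkJoins_small t ht]
  | cons x rest ih =>
    intro nl t ht
    by_cases h7 : t.length ≤ 7
    · rw [chartMakerLoop, if_pos h7]
      rw [ih nl (t ++ [x]) (by simp; omega)]
      simp
    · rw [chartMakerLoop, if_neg h7]
      rw [ih (nl ++ [PySem.Str.join "-" t]) ([] ++ [x]) (by simp)]
      rw [chunkJoins_flush t (by omega) x rest]
      simp

-- B's index loop computes the chunk joins of the not-yet-visited suffix
lemma altLoop_eq (xs : List String) (chunks : List String) (i : Nat) :
    altLoop xs chunks i = chunks ++ chunkJoins (xs.drop i) := by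
  rw [altLoop.eq_def]
  have hslice : PySem.List.slice xs (some (i : Int)) (some ((i : Int) + 8))
      = (xs.drop i).take 8 := by
    rw [show ((i : Int) + 8) = ((i : Int) + ((8 : Nat) : Int)) by push_cast; ring]
    exact PySem.List.slice_natCast_add xs i 8
  by_cases hle : xs.length ≤ i + 8
  · rw [if_pos hle, hslice]
    have hlen : (xs.drop i).length ≤ 8 := by simp; omega
    rw [chunkJoins_small _ hlen, List.take_of_length_le hlen]
  · rw [if_neg hle, hslice]
    rw [altLoop_eq xs _ (i + 8)]
    rw [chunkJoins.eq_def (xs.drop i), if_neg (by simp; omega)]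
    rw [List.drop_drop]
    simp
termination_by xs.length - i

-- ===== VERDICT (by name: the statement is the Claim_ definition above) =====
theorem chartMaker_spec : Claim_equal_chartMaker := by
  intro list _
  show chartMaker list = chartMaker_alt list
  unfold chartMaker chartMaker_alt
  rw [altLoop_eq list [] 0]
  have := loop_spec list
    ["RECORD CHART", "OCTOBER 2024", "\n", "________________________", "DB SG FB FZ GB LB GL DS"] [] (by simp)
  simp only [List.nil_append, List.drop_zero] at this ⊢
  simp only [pvHeader, pvFooter, List.append_assoc]
  rw [← List.append_assoc _ [PySem.Str.join "-" _], this]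
  simp
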